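-- pv_equiv track=rewrite | github.com/EVSConsultoriaPatrimonial/EVS_COTEJ_V3 | db_utils_v2.py | _qmark_to_pyformat
-- ===== SOURCE A (Python) =====
-- def _qmark_to_pyformat(sql: str) -> str:
--     out: list[str] = []
--     in_single = False
--     in_double = False
--     for ch in sql:
--         if ch == "'" and not in_double:
--             in_single = not in_single
--             out.append(ch)
--             continue
--         if ch == '"' and not in_single:
--             in_double = not in_double
--             out.append(ch)
--             continue
--         if ch == "?" and not in_single and not in_double:
--             out.append("%s")
--         else:
--             out.append(ch)
--     return "".join(out)
-- ===== SOURCE B (Python) =====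
-- def _qmark_to_pyformat(sql: str) -> str:
--     # Segment scanner: jump over whole quoted runs with str.find instead of
--     # toggling per-character quote flags.
--     out = []
--     i = 0
--     n = len(sql)
--     while i < n:
--         ch = sql[i]
--         if ch == "'" or ch == '"':
--             j = sql.find(ch, i + 1)
--             if j == -1:
--                 out.append(sql[i:])
--                 i = n
--             else:
--                 out.append(sql[i:j + 1])
--                 i = j + 1
--         elif ch == "?":
--             out.append("%s")
--             i += 1
--         else:
--             out.append(ch)
--             i += 1
--     return "".join(out)
-- ===== Notes on version B (the rewrite author's own statement) =====
-- stated objective: alternative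
-- what changed: Replaces the per-character quote-flag toggling loop with a segment scanner that jumps over each whole quoted run at once via str.find, so no quote state is maintained.
import Mathlib
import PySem

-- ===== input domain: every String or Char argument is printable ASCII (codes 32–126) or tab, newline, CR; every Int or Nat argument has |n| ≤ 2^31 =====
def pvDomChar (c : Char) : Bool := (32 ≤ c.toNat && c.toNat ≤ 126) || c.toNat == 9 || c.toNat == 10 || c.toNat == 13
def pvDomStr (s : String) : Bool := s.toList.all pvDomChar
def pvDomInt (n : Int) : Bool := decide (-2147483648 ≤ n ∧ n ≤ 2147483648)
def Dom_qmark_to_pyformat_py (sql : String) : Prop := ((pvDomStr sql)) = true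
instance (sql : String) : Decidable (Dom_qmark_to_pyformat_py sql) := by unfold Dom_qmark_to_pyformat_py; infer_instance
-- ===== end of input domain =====

-- B replaces A's per-character quote-flag scanner by a segment scanner that jumps
-- over each whole quoted run at once (alternative decomposition, same cost).


-- ===== PORT A =====
-- A's loop: one char at a time, with in_single/in_double flags; "%s" is emitted
-- as the two chars '%','s' (the final "".join is char-list concatenation).
def pvLoopA : List Char → Bool → Bool → List Char
  | [], _, _ => []
  | ch :: rest, insg, indb =>
    if ch = '\'' ∧ ¬(indb = true) then ch :: pvLoopA rest (!insg) indb
    else if ch = '"' ∧ ¬(insg = true) then ch :: pvLoopA rest insg (!indb)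
    else if ch = '?' ∧ ¬(insg = true) ∧ ¬(indb = true) then '%' :: 's' :: pvLoopA rest insg indb
    else ch :: pvLoopA rest insg indb

def qmark_to_pyformat_py (sql : String) : String :=
  String.ofList (pvLoopA sql.toList false false)

-- ===== PORT B =====
-- B's loop: on a quote, sql.find (ported as the takeWhile/dropWhile split) jumps
-- to the matching quote; an unterminated quote (find = -1) copies the rest verbatim.
def pvLoopB : List Char → List Char
  | [] => []
  | c :: rest =>
    if c = '\'' ∨ c = '"' then
      if (rest.dropWhile (· ≠ c)).isEmpty then
        c :: rest.takeWhile (· ≠ c)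
      else
        c :: (rest.takeWhile (· ≠ c) ++ c :: pvLoopB (rest.dropWhile (· ≠ c)).tail)
    else if c = '?' then '%' :: 's' :: pvLoopB rest
    else c :: pvLoopB rest
termination_by l => l.length
decreasing_by
  · have h1 := List.length_dropWhile_le (fun x => decide (x ≠ c)) rest
    simp only [List.length_tail, List.length_cons]
    omega
  · simp
  · simp

def qmark_to_pyformat_py_alt (sql : String) : String :=
  String.ofList (pvLoopB sql.toList)

-- ===== PRECONDITION & SPEC =====
def Spec_qmark_to_pyformat_py (sql : String) (out : String) : Prop := out = qmark_to_pyformat_py_alt sql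
instance (sql : String) (out : String) : Decidable (Spec_qmark_to_pyformat_py sql out) := by unfold Spec_qmark_to_pyformat_py; infer_instance

-- ===== CLAIM (what is proved, stated in full; the proofs are below) =====
def Claim_equal_qmark_to_pyformat_py : Prop := ∀ (sql : String), Dom_qmark_to_pyformat_py sql → Spec_qmark_to_pyformat_py sql (qmark_to_pyformat_py sql)

-- ===== LEMMAS AND PROOFS =====

-- Inside a single-quoted run A copies chars verbatim until the closing quote.
theorem pvLoopA_single (l : List Char) :
    pvLoopA l true false =
      if (l.dropWhile (· ≠ '\'')).isEmpty then l.takeWhile (· ≠ '\'')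
      else l.takeWhile (· ≠ '\'') ++ '\'' :: pvLoopA (l.dropWhile (· ≠ '\'')).tail false false := by
  induction l with
  | nil => simp [pvLoopA]
  | cons c rest ih =>
    by_cases hc : c = '\''
    · subst hc; simp [pvLoopA]
    · have hl : pvLoopA (c :: rest) true false = c :: pvLoopA rest true false := by
        simp [pvLoopA, hc]
      rw [hl, ih,
        show List.dropWhile (· ≠ '\'') (c :: rest) = List.dropWhile (· ≠ '\'') rest from by
          simp [hc],
        show List.takeWhile (· ≠ '\'') (c :: rest) = c :: List.takeWhile (· ≠ '\'') rest from by
          simp [hc]]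
      split_ifs <;> simp

-- Inside a double-quoted run A copies chars verbatim until the closing quote.
theorem pvLoopA_double (l : List Char) :
    pvLoopA l false true =
      if (l.dropWhile (· ≠ '"')).isEmpty then l.takeWhile (· ≠ '"')
      else l.takeWhile (· ≠ '"') ++ '"' :: pvLoopA (l.dropWhile (· ≠ '"')).tail false false := by
  induction l with
  | nil => simp [pvLoopA]
  | cons c rest ih =>
    by_cases hc : c = '"'
    · subst hc; simp [pvLoopA]
    · have hl : pvLoopA (c :: rest) false true = c :: pvLoopA rest false true := by
        simp [pvLoopA, hc]
      rw [hl, ih,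
        show List.dropWhile (· ≠ '"') (c :: rest) = List.dropWhile (· ≠ '"') rest from by
          simp [hc],
        show List.takeWhile (· ≠ '"') (c :: rest) = c :: List.takeWhile (· ≠ '"') rest from by
          simp [hc]]
      split_ifs <;> simp

theorem pvLoopA_eq_pvLoopB : ∀ (l : List Char), pvLoopA l false false = pvLoopB l
  | [] => by simp [pvLoopA, pvLoopB]
  | c :: rest => by
    by_cases hs : c = '\''
    · subst hs
      have hl : pvLoopA ('\'' :: rest) false false = '\'' :: pvLoopA rest true false := by
        simp [pvLoopA]
      have ht : ((rest.dropWhile (· ≠ '\'')).tail).length < ('\'' :: rest).length := by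
        have h1 := List.length_dropWhile_le (fun x => decide (x ≠ '\'')) rest
        simp only [List.length_tail, List.length_cons]; omega
      rw [hl, pvLoopA_single rest, pvLoopB,
        pvLoopA_eq_pvLoopB ((rest.dropWhile (· ≠ '\'')).tail)]
      split_ifs <;> simp_all
    · by_cases hd : c = '"'
      · subst hd
        have hl : pvLoopA ('"' :: rest) false false = '"' :: pvLoopA rest false true := by
          simp [pvLoopA]
        have ht : ((rest.dropWhile (· ≠ '"')).tail).length < ('"' :: rest).length := by
          have h1 := List.length_dropWhile_le (fun x => decide (x ≠ '"')) rest
          simp only [List.length_tail, List.length_cons]; omega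
        rw [hl, pvLoopA_double rest, pvLoopB,
          pvLoopA_eq_pvLoopB ((rest.dropWhile (· ≠ '"')).tail)]
        split_ifs <;> simp_all
      · have ht : rest.length < (c :: rest).length := by simp
        by_cases hq : c = '?'
        · subst hq
          have hl : pvLoopA ('?' :: rest) false false = '%' :: 's' :: pvLoopA rest false false := by
            simp [pvLoopA]
          rw [hl, pvLoopA_eq_pvLoopB rest, pvLoopB]
          simp
        · have hl : pvLoopA (c :: rest) false false = c :: pvLoopA rest false false := by
            simp [pvLoopA, hs, hd, hq]
          rw [hl, pvLoopA_eq_pvLoopB rest, pvLoopB]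
          simp [hs, hd, hq]
termination_by l => l.length
decreasing_by all_goals (first | exact ht)

-- ===== VERDICT (by name: the statement is the Claim_ definition above) =====
theorem qmark_to_pyformat_py_spec : Claim_equal_qmark_to_pyformat_py := by
  intro sql _
  unfold Spec_qmark_to_pyformat_py qmark_to_pyformat_py qmark_to_pyformat_py_alt
  rw [pvLoopA_eq_pvLoopB]
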